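-- pv_equiv track=rewrite | github.com/Asymetry1021/Parabox | Parabox_Editor.py | whereBoxSpecClicked
-- ===== SOURCE A (Python) =====
-- def whereBoxSpecClicked(mouseX:int,mouseY:int,boxSpecial:str):
--     #returns what part of the box specs was clicked on
--     descList=["Name","Row","Column","Color","Special"]
--     if not boxSpecial=="":
--         descList.append("Extension")
--     for i in range(6):
--         row=i//4
--         col=i%4
--         if i==5 and boxSpecial=="":
--             continue
--         rectx=100+200*col
--         recty=50+200*row
--         if mouseX>=rectx and mouseX<=rectx+150 and mouseY>=recty and mouseY<=recty+150 and i in range(5):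
--             return descList[i]
--         elif mouseX>=rectx and mouseX<=rectx+150 and mouseY>=recty and mouseY<=recty+150 and i==5 and not boxSpecial=="":
--             return descList[5]
--     if mouseX>=1100 and mouseX<=1200 and mouseY>=0 and mouseY<=50:
--         return "CreateBox"
--     if mouseX>=1100 and mouseX<=1200 and mouseY>=50 and mouseY<=100:
--         return "Default"
--     return ""
-- ===== SOURCE B (Python) =====
-- def whereBoxSpecClicked(mouseX: int, mouseY: int, boxSpecial: str):
--     # arithmetic inversion: compute the candidate grid cell directly from the
--     # coordinates with divmod instead of scanning rectangles
--     labels = ["Name", "Row", "Column", "Color", "Special", "Extension"]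
--     if mouseX >= 100 and mouseY >= 50:
--         col, dx = divmod(mouseX - 100, 200)
--         row, dy = divmod(mouseY - 50, 200)
--         if dx <= 150 and dy <= 150 and col < 4 and row < 2:
--             i = 4 * row + col
--             if i < 5 or (i == 5 and boxSpecial != ""):
--                 return labels[i]
--     if 1100 <= mouseX <= 1200:
--         if 0 <= mouseY <= 50:
--             return "CreateBox"
--         if 50 <= mouseY <= 100:
--             return "Default"
--     return ""
-- ===== Notes on version B (the rewrite author's own statement) =====
-- stated objective: alternative
-- what changed: Replaces A's scan over six rectangles (index loop with i//4,i%4 and trailing button checks) by an arithmetic inversion of the grid geometry: divmod on the coordinates computes the candidate cell (row,col) directly, the in-cell offset is range-checked, and the label list is indexed once.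
import Mathlib
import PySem

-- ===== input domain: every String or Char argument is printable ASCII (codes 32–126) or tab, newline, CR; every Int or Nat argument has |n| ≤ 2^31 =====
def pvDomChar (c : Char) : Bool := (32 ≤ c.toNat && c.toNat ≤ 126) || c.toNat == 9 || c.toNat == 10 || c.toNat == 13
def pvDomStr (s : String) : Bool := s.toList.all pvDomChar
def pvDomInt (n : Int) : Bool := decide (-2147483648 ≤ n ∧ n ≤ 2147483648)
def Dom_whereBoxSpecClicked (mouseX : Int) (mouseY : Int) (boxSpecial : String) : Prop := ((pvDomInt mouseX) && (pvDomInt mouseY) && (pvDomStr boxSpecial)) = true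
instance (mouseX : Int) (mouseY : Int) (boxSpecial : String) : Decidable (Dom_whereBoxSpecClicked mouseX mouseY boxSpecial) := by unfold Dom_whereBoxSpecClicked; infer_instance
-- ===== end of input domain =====

-- B replaces A's rectangle-scanning loop by an arithmetic inversion of the grid geometry:
-- divmod computes the candidate cell directly from the coordinates (objective: alternative).


-- ===== PORT A =====
-- the for-loop over range(6) with early return, as structural recursion over the index list;
-- descList[i] is in range in the reachable branches, so .getD "" never supplies its default
def whereBoxSpecClickedLoop (mouseX : Int) (mouseY : Int) (boxSpecial : String)
    (descList : List String) : List Int → Option String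
  | [] => none
  | i :: rest =>
    let row := PySem.Int.floordiv i 4
    let col := PySem.Int.mod i 4
    if i = 5 ∧ boxSpecial = "" then
      whereBoxSpecClickedLoop mouseX mouseY boxSpecial descList rest
    else
      let rectx := 100 + 200 * col
      let recty := 50 + 200 * row
      if mouseX ≥ rectx ∧ mouseX ≤ rectx + 150 ∧ mouseY ≥ recty ∧ mouseY ≤ recty + 150 ∧ 0 ≤ i ∧ i < 5 then
        some ((PySem.List.pyGet? descList i).getD "")
      else if mouseX ≥ rectx ∧ mouseX ≤ rectx + 150 ∧ mouseY ≥ recty ∧ mouseY ≤ recty + 150 ∧ i = 5 ∧ ¬ boxSpecial = "" then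
        some ((PySem.List.pyGet? descList 5).getD "")
      else
        whereBoxSpecClickedLoop mouseX mouseY boxSpecial descList rest

def whereBoxSpecClicked (mouseX : Int) (mouseY : Int) (boxSpecial : String) : String :=
  let descList := ["Name", "Row", "Column", "Color", "Special"]
  let descList := if ¬ boxSpecial = "" then descList ++ ["Extension"] else descList
  match whereBoxSpecClickedLoop mouseX mouseY boxSpecial descList (PySem.List.pyRange 0 6 1) with
  | some s => s
  | none =>
    if mouseX ≥ 1100 ∧ mouseX ≤ 1200 ∧ mouseY ≥ 0 ∧ mouseY ≤ 50 then "CreateBox"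
    else if mouseX ≥ 1100 ∧ mouseX ≤ 1200 ∧ mouseY ≥ 50 ∧ mouseY ≤ 100 then "Default"
    else ""

-- ===== PORT B =====
-- arithmetic inversion: divmod gives the candidate cell, labels indexed once
def whereBoxSpecClicked_alt (mouseX : Int) (mouseY : Int) (boxSpecial : String) : String :=
  let labels := ["Name", "Row", "Column", "Color", "Special", "Extension"]
  let gridHit : Option String :=
    if mouseX ≥ 100 ∧ mouseY ≥ 50 then
      let col := PySem.Int.floordiv (mouseX - 100) 200
      let dx := PySem.Int.mod (mouseX - 100) 200
      let row := PySem.Int.floordiv (mouseY - 50) 200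
      let dy := PySem.Int.mod (mouseY - 50) 200
      if dx ≤ 150 ∧ dy ≤ 150 ∧ col < 4 ∧ row < 2 then
        let i := 4 * row + col
        if i < 5 ∨ (i = 5 ∧ boxSpecial ≠ "") then
          some ((PySem.List.pyGet? labels i).getD "")
        else none
      else none
    else none
  match gridHit with
  | some s => s
  | none =>
    if 1100 ≤ mouseX ∧ mouseX ≤ 1200 then
      if 0 ≤ mouseY ∧ mouseY ≤ 50 then "CreateBox"
      else if 50 ≤ mouseY ∧ mouseY ≤ 100 then "Default"
      else ""
    else ""

-- ===== PRECONDITION & SPEC =====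
def Spec_whereBoxSpecClicked (mouseX : Int) (mouseY : Int) (boxSpecial : String) (out : String) : Prop := out = whereBoxSpecClicked_alt mouseX mouseY boxSpecial
instance (mouseX : Int) (mouseY : Int) (boxSpecial : String) (out : String) : Decidable (Spec_whereBoxSpecClicked mouseX mouseY boxSpecial out) := by unfold Spec_whereBoxSpecClicked; infer_instance

-- ===== CLAIM (what is proved, stated in full; the proofs are below) =====
def Claim_equal_whereBoxSpecClicked : Prop := ∀ (mouseX : Int) (mouseY : Int) (boxSpecial : String), Dom_whereBoxSpecClicked mouseX mouseY boxSpecial → Spec_whereBoxSpecClicked mouseX mouseY boxSpecial (whereBoxSpecClicked mouseX mouseY boxSpecial)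

-- ===== LEMMAS AND PROOFS =====
theorem pyRange06 : PySem.List.pyRange 0 6 1 = [0, 1, 2, 3, 4, 5] := by decide

theorem floordiv200 (a : Int) : PySem.Int.floordiv a 200 = a / 200 :=
  PySem.Int.floordiv_eq_ediv_of_pos (by norm_num)
theorem mod200 (a : Int) : PySem.Int.mod a 200 = a % 200 :=
  PySem.Int.mod_eq_emod_of_pos (by norm_num)

-- proof-only reference: the hit regions written as one chain of coordinate tests
def hitSpec (x y : Int) (s : String) : String :=
  if 100 ≤ x ∧ x ≤ 250 ∧ 50 ≤ y ∧ y ≤ 200 then "Name"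
  else if 300 ≤ x ∧ x ≤ 450 ∧ 50 ≤ y ∧ y ≤ 200 then "Row"
  else if 500 ≤ x ∧ x ≤ 650 ∧ 50 ≤ y ∧ y ≤ 200 then "Column"
  else if 700 ≤ x ∧ x ≤ 850 ∧ 50 ≤ y ∧ y ≤ 200 then "Color"
  else if 100 ≤ x ∧ x ≤ 250 ∧ 250 ≤ y ∧ y ≤ 400 then "Special"
  else if ¬ s = "" ∧ 300 ≤ x ∧ x ≤ 450 ∧ 250 ≤ y ∧ y ≤ 400 then "Extension"
  else if 1100 ≤ x ∧ x ≤ 1200 ∧ 0 ≤ y ∧ y ≤ 50 then "CreateBox"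
  else if 1100 ≤ x ∧ x ≤ 1200 ∧ 50 ≤ y ∧ y ≤ 100 then "Default"
  else ""

set_option maxHeartbeats 1600000 in
theorem loopA_eq (x y : Int) (s : String) :
    whereBoxSpecClicked x y s = hitSpec x y s := by
  by_cases hs : s = "" <;>
  · simp only [whereBoxSpecClicked, pyRange06, hs, if_pos, if_neg,
      not_true_eq_false, not_false_eq_true]
    simp only [whereBoxSpecClickedLoop, List.cons_append, List.nil_append,
      PySem.Int.floordiv, PySem.Int.mod, PySem.List.pyGet?, PySem.List.pyIdx?,
      show Int.fdiv 0 4 = 0 from by decide, show Int.fmod 0 4 = 0 from by decide,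
      show Int.fdiv 1 4 = 0 from by decide, show Int.fmod 1 4 = 1 from by decide,
      show Int.fdiv 2 4 = 0 from by decide, show Int.fmod 2 4 = 2 from by decide,
      show Int.fdiv 3 4 = 0 from by decide, show Int.fmod 3 4 = 3 from by decide,
      show Int.fdiv 4 4 = 1 from by decide, show Int.fmod 4 4 = 0 from by decide,
      show Int.fdiv 5 4 = 1 from by decide, show Int.fmod 5 4 = 1 from by decide]
    norm_num
    simp only [hitSpec, hs, not_true_eq_false, not_false_eq_true, false_and, true_and, if_neg]
    split_ifs <;> first | rfl | omega | simp_all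

set_option maxHeartbeats 8000000 in
theorem altB_eq (x y : Int) (s : String) :
    whereBoxSpecClicked_alt x y s = hitSpec x y s := by
  have dx1 : 200 * ((x - 100) / 200) + (x - 100) % 200 = x - 100 := by omega
  have dx2 : 0 ≤ (x - 100) % 200 := by omega
  have dx3 : (x - 100) % 200 < 200 := by omega
  have dy1 : 200 * ((y - 50) / 200) + (y - 50) % 200 = y - 50 := by omega
  have dy2 : 0 ≤ (y - 50) % 200 := by omega
  have dy3 : (y - 50) % 200 < 200 := by omega
  simp only [whereBoxSpecClicked_alt, hitSpec, floordiv200, mod200]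
  by_cases hxy : x ≥ 100 ∧ y ≥ 50
  · rw [if_pos hxy]
    by_cases hb : (x - 100) % 200 ≤ 150 ∧ (y - 50) % 200 ≤ 150 ∧ (x - 100) / 200 < 4 ∧ (y - 50) / 200 < 2
    · rw [if_pos hb]
      have hqx : (x - 100) / 200 = 0 ∨ (x - 100) / 200 = 1 ∨ (x - 100) / 200 = 2 ∨ (x - 100) / 200 = 3 := by omega
      have hqy : (y - 50) / 200 = 0 ∨ (y - 50) / 200 = 1 := by omega
      rcases hqx with h|h|h|h <;> rcases hqy with h'|h' <;>
        simp only [h, h'] at dx1 dy1 ⊢ <;>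
        norm_num [PySem.List.pyGet?, PySem.List.pyIdx?] <;>
        split_ifs <;> first | rfl | omega | (simp_all <;> omega)
    · rw [if_neg hb]
      split_ifs <;> first | rfl | omega
  · rw [if_neg hxy]
    split_ifs <;> first | rfl | omega

theorem whereBoxSpecClicked_eq_alt (mouseX : Int) (mouseY : Int) (boxSpecial : String) :
    whereBoxSpecClicked mouseX mouseY boxSpecial = whereBoxSpecClicked_alt mouseX mouseY boxSpecial := by
  rw [loopA_eq, altB_eq]

-- ===== VERDICT (by name: the statement is the Claim_ definition above) =====
theorem whereBoxSpecClicked_spec : Claim_equal_whereBoxSpecClicked := by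
  intro mouseX mouseY boxSpecial _
  exact whereBoxSpecClicked_eq_alt mouseX mouseY boxSpecial
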